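-- pv_equiv track=rewrite | github.com/Malte-Kn/Cryptographic-Data-Quality | FederatedLearning/LocalTrainers/Local_Trainers.py | imageQuality_check
-- ===== SOURCE A (Python) =====
-- def imageQuality_check(trainerImgs):
--     pixels = len(trainerImgs[1][1])
--     badImgs = []
--     gray = 0
--     distribution = [0,0,0,0,0,0]
--     for x in range(len(trainerImgs)):
--         for i in range(pixels):
--             for j in range(pixels):
--                 if trainerImgs[x][i][j] < 30:
--                     distribution[0] += 1
--                 elif trainerImgs[x][i][j] < 90:
--                     distribution[1] += 1
--                 elif trainerImgs[x][i][j] < 150: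
--                     distribution[2] += 1
--                 elif trainerImgs[x][i][j] < 200:
--                     distribution[3] += 1
--                 elif trainerImgs[x][i][j] < 225:
--                     distribution[4] += 1
--                 elif trainerImgs[x][i][j] <= 255:
--                     distribution[5] += 1
--         gray = distribution[1] + distribution[2]+distribution[3]+distribution[4]
--         if gray > 500 or distribution[5] < 10:
--             badImgs.append(x)
--         distribution = [0,0,0,0,0,0]
--     return badImgs
-- ===== SOURCE B (Python) =====
-- def _bisect_left(a, x):
--     # standard bisect_left binary-search loop (hand-written; A imports nothing)
--     lo, hi = 0, len(a)
--     while lo < hi: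
--         mid = (lo + hi) // 2
--         if a[mid] < x:
--             lo = mid + 1
--         else:
--             hi = mid
--     return lo
--
-- def imageQuality_check(trainerImgs):
--     pixels = len(trainerImgs[1][1])
--     badImgs = []
--     for x, img in enumerate(trainerImgs):
--         window = sorted(img[i][j] for i in range(pixels) for j in range(pixels))
--         lo225 = _bisect_left(window, 225)
--         gray = lo225 - _bisect_left(window, 30)        # values in [30, 225)
--         bright = _bisect_left(window, 256) - lo225     # values in [225, 255]
--         if gray > 500 or bright < 10:
--             badImgs.append(x)
--     return badImgs
-- ===== Notes on version B (the rewrite author's own statement) =====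
-- stated objective: alternative
-- what changed: Replaces A's per-pixel 6-bin histogram classification chain by collecting each image's p*p pixel values, sorting them once, and reading the two needed counts (gray in [30,225), bright in [225,255]) as differences of binary-search insertion points (hand-written bisect_left); no histogram list or per-pixel branch chain remains.
import Mathlib
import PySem

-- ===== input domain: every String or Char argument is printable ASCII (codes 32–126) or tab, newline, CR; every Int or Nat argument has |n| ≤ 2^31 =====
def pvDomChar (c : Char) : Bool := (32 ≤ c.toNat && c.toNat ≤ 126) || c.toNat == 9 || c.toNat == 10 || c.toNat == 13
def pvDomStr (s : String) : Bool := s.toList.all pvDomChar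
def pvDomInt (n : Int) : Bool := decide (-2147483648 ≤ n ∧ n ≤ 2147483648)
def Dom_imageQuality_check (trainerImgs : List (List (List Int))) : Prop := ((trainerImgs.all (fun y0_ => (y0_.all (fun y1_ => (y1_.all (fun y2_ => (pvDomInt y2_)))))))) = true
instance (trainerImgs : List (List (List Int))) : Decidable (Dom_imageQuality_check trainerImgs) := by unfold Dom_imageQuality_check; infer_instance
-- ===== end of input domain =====

-- B replaces A's nested range-index loops with a per-pixel 6-bin histogram by sorting each
-- image's slice-built window once and reading the two needed counts as differences of
-- binary-search (bisect_left) insertion points (objective: alternative algorithm).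

-- ===== PORT A =====
-- one pixel of A's classification chain: distribution[k] += 1 (read-modify-write on the list)
def pvA_pixelStep (v : Int) (dist : List Int) : List Int :=
  if v < 30 then PySem.List.pySetD dist 0 (PySem.List.pyGetD dist 0 0 + 1)
  else if v < 90 then PySem.List.pySetD dist 1 (PySem.List.pyGetD dist 1 0 + 1)
  else if v < 150 then PySem.List.pySetD dist 2 (PySem.List.pyGetD dist 2 0 + 1)
  else if v < 200 then PySem.List.pySetD dist 3 (PySem.List.pyGetD dist 3 0 + 1)
  else if v < 225 then PySem.List.pySetD dist 4 (PySem.List.pyGetD dist 4 0 + 1)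
  else if v ≤ 255 then PySem.List.pySetD dist 5 (PySem.List.pyGetD dist 5 0 + 1)
  else dist

-- A's two inner loops: for i in range(pixels): for j in range(pixels): classify trainerImgs[x][i][j]
def pvA_inner (t : List (List (List Int))) (pixels : Nat) (x : Int) (dist : List Int) : List Int :=
  (PySem.List.pyRange 0 (pixels : Int) 1).foldl
    (fun dist i =>
      (PySem.List.pyRange 0 (pixels : Int) 1).foldl
        (fun dist j =>
          pvA_pixelStep (PySem.List.pyGetD (PySem.List.pyGetD (PySem.List.pyGetD t x []) i []) j 0) dist)
        dist)
    dist

-- one iteration of A's outer loop (state = (badImgs, distribution); distribution reset at the end)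
def pvA_step (t : List (List (List Int))) (pixels : Nat) (st : List Int × List Int) (x : Int) :
    List Int × List Int :=
  let dist := pvA_inner t pixels x st.2
  let gray := PySem.List.pyGetD dist 1 0 + PySem.List.pyGetD dist 2 0 +
              PySem.List.pyGetD dist 3 0 + PySem.List.pyGetD dist 4 0
  (if gray > 500 ∨ PySem.List.pyGetD dist 5 0 < 10 then st.1 ++ [x] else st.1, [0, 0, 0, 0, 0, 0])

def imageQuality_check (trainerImgs : List (List (List Int))) : List Int :=
  let pixels : Nat := (PySem.List.pyGetD (PySem.List.pyGetD trainerImgs 1 []) 1 []).length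
  ((PySem.List.pyRange 0 (trainerImgs.length : Int) 1).foldl
      (pvA_step trainerImgs pixels) ([], [0, 0, 0, 0, 0, 0])).1

-- ===== PORT B =====
-- Source B's _bisect_left is the standard bisect_left binary-search loop, ported exactly by
-- PySem.List.bisectLeft (the same lo/hi midpoint loop).
def imageQuality_check_alt (trainerImgs : List (List (List Int))) : List Int :=
  let pixels : Nat := (PySem.List.pyGetD (PySem.List.pyGetD trainerImgs 1 []) 1 []).length
  (PySem.List.enumerate trainerImgs 0).foldl
    (fun badImgs xi =>
      let window := PySem.List.sorted
        ((PySem.List.pyRange 0 (pixels : Int) 1).foldl (fun acc i =>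
            (PySem.List.pyRange 0 (pixels : Int) 1).foldl (fun acc j =>
              acc ++ [PySem.List.pyGetD (PySem.List.pyGetD xi.2 i []) j 0]) acc) [])
        (fun v => v) false
      let lo225 : Int := (PySem.List.bisectLeft window 225 : Nat)
      let gray : Int := lo225 - ((PySem.List.bisectLeft window 30 : Nat) : Int)
      let bright : Int := ((PySem.List.bisectLeft window 256 : Nat) : Int) - lo225
      if gray > 500 ∨ bright < 10 then badImgs ++ [xi.1] else badImgs)
    []

-- ===== PRECONDITION & SPEC =====
-- Pre_ is exactly the set where the Python A returns normally: A raises IndexError unless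
-- trainerImgs[1][1] exists (two outer indexings) and every image has at least `pixels` rows,
-- the first `pixels` of which have at least `pixels` entries.
def Pre_imageQuality_check (trainerImgs : List (List (List Int))) : Prop :=
  2 ≤ trainerImgs.length ∧ 2 ≤ (trainerImgs.getD 1 []).length ∧
  (∀ img ∈ trainerImgs,
    ((trainerImgs.getD 1 []).getD 1 []).length ≤ img.length ∧
    ∀ row ∈ img.take ((trainerImgs.getD 1 []).getD 1 []).length,
      ((trainerImgs.getD 1 []).getD 1 []).length ≤ row.length)
instance (trainerImgs : List (List (List Int))) : Decidable (Pre_imageQuality_check trainerImgs) := by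
  unfold Pre_imageQuality_check; infer_instance

def pvWitness_imageQuality_check : List (List (List Int)) :=
  [[[1, 2], [3, 4]], [[1, 2], [3, 4]]]

def Spec_imageQuality_check (trainerImgs : List (List (List Int))) (out : List Int) : Prop :=
  out = imageQuality_check_alt trainerImgs
instance (trainerImgs : List (List (List Int))) (out : List Int) :
    Decidable (Spec_imageQuality_check trainerImgs out) := by
  unfold Spec_imageQuality_check; infer_instance

-- ===== CLAIM (what is proved, stated in full; the proofs are below) =====
def Claim_equal_imageQuality_check : Prop :=
  ∀ (trainerImgs : List (List (List Int))), Dom_imageQuality_check trainerImgs →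
    Pre_imageQuality_check trainerImgs →
    Spec_imageQuality_check trainerImgs (imageQuality_check trainerImgs)

-- ===== LEMMAS AND PROOFS =====

set_option maxHeartbeats 1000000 in
theorem pvA_pixelStep_six (v a b c d e f : Int) :
    pvA_pixelStep v [a, b, c, d, e, f] =
      [if v < 30 then a + 1 else a,
       if 30 ≤ v ∧ v < 90 then b + 1 else b,
       if 90 ≤ v ∧ v < 150 then c + 1 else c,
       if 150 ≤ v ∧ v < 200 then d + 1 else d,
       if 200 ≤ v ∧ v < 225 then e + 1 else e,
       if 225 ≤ v ∧ v ≤ 255 then f + 1 else f] := by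
  unfold pvA_pixelStep
  split_ifs with h1 h2 h3 h4 h5 h6 <;>
    simp [PySem.List.pySetD_of_nonneg, PySem.List.pyGetD_eq_getElem] <;>
    omega

theorem pvA_fold_count (vs : List Int) : ∀ (a b c d e f : Int),
    vs.foldl (fun dist v => pvA_pixelStep v dist) [a, b, c, d, e, f] =
      [a + vs.countP (fun v => decide (v < 30)),
       b + vs.countP (fun v => decide (30 ≤ v) && decide (v < 90)),
       c + vs.countP (fun v => decide (90 ≤ v) && decide (v < 150)),
       d + vs.countP (fun v => decide (150 ≤ v) && decide (v < 200)),
       e + vs.countP (fun v => decide (200 ≤ v) && decide (v < 225)),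
       f + vs.countP (fun v => decide (225 ≤ v) && decide (v ≤ 255))] := by
  induction vs with
  | nil => simp
  | cons v vs ih =>
    intro a b c d e f
    simp only [List.foldl_cons, pvA_pixelStep_six, ih, List.countP_cons]
    simp only [List.cons.injEq]
    repeat' apply And.intro
    all_goals simp only [Bool.and_eq_true, decide_eq_true_eq]
    all_goals first | trivial | (split_ifs <;> push_cast <;> omega)

theorem pv_pyGetD_take {α : Type} (xs : List α) (p : Nat) (i : Int) (d : α)
    (h0 : 0 ≤ i) (hi : i < (p : Int)) (hp : p ≤ xs.length) :
    PySem.List.pyGetD xs i d = PySem.List.pyGetD (xs.take p) i d := by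
  rw [PySem.List.pyGetD_eq_getElem xs d h0 (by omega),
      PySem.List.pyGetD_eq_getElem (xs.take p) d h0 (by simp; omega)]
  exact (List.getElem_take).symm

-- the p×p window both programs look at
def pvWindow (p : Nat) (img : List (List Int)) : List Int :=
  (img.take p).flatMap (fun row => row.take p)

theorem pv_rowfold_take {β : Type} (g : β → Int → β) (row : List Int) (p : Nat)
    (hp : p ≤ row.length) (d : β) :
    (PySem.List.pyRange 0 (p : Int) 1).foldl
        (fun st j => g st (PySem.List.pyGetD row j 0)) d =
      (row.take p).foldl g d := by
  have hL : (row.take p).length = p := by simp; omega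
  have h1 : (PySem.List.pyRange 0 (p : Int) 1).foldl
        (fun st j => g st (PySem.List.pyGetD row j 0)) d =
      (PySem.List.pyRange 0 (p : Int) 1).foldl
        (fun st j => g st (PySem.List.pyGetD (row.take p) j 0)) d := by
    apply PySem.List.foldl_congr_mem
    intro acc j hj
    rw [PySem.List.mem_pyRange_one] at hj
    rw [pv_pyGetD_take row p j 0 hj.1 hj.2 hp]
  rw [h1]
  have h2 : ((p : Int)) = ((row.take p).length : Int) := by rw [hL]
  rw [h2, PySem.List.foldl_pyRange_zero_pyGetD' (row.take p) 0 g d]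

-- nested index loops over a big-enough image are a fold over its p×p window
theorem pv_inner_window_img {β : Type} (g : β → Int → β)
    (img : List (List Int)) (p : Nat) (d0 : β)
    (hlen : p ≤ img.length) (hrow : ∀ row ∈ img.take p, p ≤ row.length) :
    (PySem.List.pyRange 0 (p : Int) 1).foldl
        (fun st i => (PySem.List.pyRange 0 (p : Int) 1).foldl
          (fun st j =>
            g st (PySem.List.pyGetD (PySem.List.pyGetD img i []) j 0)) st) d0 =
      (pvWindow p img).foldl g d0 := by
  have hL : (img.take p).length = p := by simp; omega
  have h1 : (PySem.List.pyRange 0 (p : Int) 1).foldl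
      (fun st i => (PySem.List.pyRange 0 (p : Int) 1).foldl
        (fun st j => g st (PySem.List.pyGetD (PySem.List.pyGetD img i []) j 0)) st) d0
      = (PySem.List.pyRange 0 (p : Int) 1).foldl
      (fun st i => (PySem.List.pyRange 0 (p : Int) 1).foldl
        (fun st j => g st (PySem.List.pyGetD (PySem.List.pyGetD (img.take p) i []) j 0)) st) d0 := by
    apply PySem.List.foldl_congr_mem
    intro acc i hi
    rw [PySem.List.mem_pyRange_one] at hi
    rw [pv_pyGetD_take img p i [] hi.1 hi.2 hlen]
  rw [h1]
  have h2 : ((p : Int)) = (((img.take p)).length : Int) := by rw [hL]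
  rw [h2]
  rw [PySem.List.foldl_pyRange_zero_pyGetD' (img.take p) []
    (fun st row => (PySem.List.pyRange 0 ((img.take p).length : Int) 1).foldl
      (fun st j => g st (PySem.List.pyGetD row j 0)) st) d0]
  have h3 : (img.take p).foldl
      (fun st row => (PySem.List.pyRange 0 (((img.take p)).length : Int) 1).foldl
        (fun st j => g st (PySem.List.pyGetD row j 0)) st) d0
      = (img.take p).foldl (fun st row => (row.take p).foldl g st) d0 := by
    apply PySem.List.foldl_congr_mem
    intro acc row hr
    rw [← h2, pv_rowfold_take g row p (hrow row hr) acc]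
  rw [h3]
  unfold pvWindow
  rw [List.flatMap_def, List.foldl_flatten, List.foldl_map]

-- A's nested loops, stated through trainerImgs[x]
theorem pv_inner_window {β : Type} (g : β → Int → β) (t : List (List (List Int)))
    (p : Nat) (x : Int) (d0 : β)
    (img : List (List Int)) (himg : PySem.List.pyGetD t x [] = img)
    (hlen : p ≤ img.length) (hrow : ∀ row ∈ img.take p, p ≤ row.length) :
    (PySem.List.pyRange 0 (p : Int) 1).foldl
        (fun st i => (PySem.List.pyRange 0 (p : Int) 1).foldl
          (fun st j =>
            g st (PySem.List.pyGetD (PySem.List.pyGetD (PySem.List.pyGetD t x []) i []) j 0)) st) d0 =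
      (pvWindow p img).foldl g d0 := by
  rw [himg]
  exact pv_inner_window_img g img p d0 hlen hrow

theorem pv_gray_split (vs : List Int) :
    vs.countP (fun v => decide (30 ≤ v) && decide (v < 90)) +
      vs.countP (fun v => decide (90 ≤ v) && decide (v < 150)) +
      vs.countP (fun v => decide (150 ≤ v) && decide (v < 200)) +
      vs.countP (fun v => decide (200 ≤ v) && decide (v < 225)) =
      vs.countP (fun v => decide (30 ≤ v) && decide (v < 225)) := by
  induction vs with
  | nil => simp
  | cons v vs ih =>
    simp only [List.countP_cons, Bool.and_eq_true, decide_eq_true_eq]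
    split_ifs <;> omega

-- the badness verdict for one image, stated on the window counts
def pvIsBad (p : Nat) (img : List (List Int)) : Bool :=
  decide (((pvWindow p img).countP (fun v => decide (30 ≤ v) && decide (v < 225)) : Int) > 500) ||
  decide (((pvWindow p img).countP (fun v => decide (225 ≤ v) && decide (v ≤ 255)) : Int) < 10)

theorem pvA_cond_eq_isBad (t : List (List (List Int))) (p : Nat) (x : Int)
    (img : List (List Int)) (himg : PySem.List.pyGetD t x [] = img)
    (hlen : p ≤ img.length) (hrow : ∀ row ∈ img.take p, p ≤ row.length) :
    (let dist := pvA_inner t p x [0, 0, 0, 0, 0, 0]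
     (PySem.List.pyGetD dist 1 0 + PySem.List.pyGetD dist 2 0 +
        PySem.List.pyGetD dist 3 0 + PySem.List.pyGetD dist 4 0 > 500 ∨
      PySem.List.pyGetD dist 5 0 < 10)) ↔ pvIsBad p img = true := by
  have hw := pv_inner_window (fun dist v => pvA_pixelStep v dist) t p x
    ([0, 0, 0, 0, 0, 0] : List Int) img himg hlen hrow
  unfold pvA_inner
  rw [hw, pvA_fold_count]
  simp only [pvIsBad, Bool.or_eq_true, decide_eq_true_eq]
  simp only [PySem.List.pyGetD_ofNat', List.getD_cons_succ, List.getD_cons_zero]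
  have hs := pv_gray_split (pvWindow p img)
  omega

-- ---- B-side lemmas: bisect_left on a sorted list counts the elements below the probe ----

theorem pv_countP_of_prefix (p : Int → Bool) :
    ∀ (xs : List Int) (k : Nat), k ≤ xs.length →
      (∀ j (hj : j < xs.length), p xs[j] = decide (j < k)) → xs.countP p = k := by
  intro xs
  induction xs with
  | nil => intro k hk _; simpa using (Nat.le_zero.mp (by simpa using hk)).symm
  | cons a t ih =>
    intro k hk h
    match k with
    | 0 =>
      have h0 : p a = false := by simpa using h 0 (by simp)
      have ht : t.countP p = 0 := ih 0 (Nat.zero_le _) (by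
        intro j hj
        simpa using h (j + 1) (by simpa using Nat.succ_lt_succ hj))
      simp [h0, ht]
    | k + 1 =>
      have h0 : p a = true := by simpa using h 0 (by simp)
      have ht : t.countP p = k := ih k (by simpa using hk) (by
        intro j hj
        simpa [Nat.succ_lt_succ_iff] using h (j + 1) (by simpa using Nat.succ_lt_succ hj))
      simp [h0, ht]

theorem pv_bisectLeft_eq_countP (s : List Int) (x : Int)
    (hs : s.Pairwise (· ≤ ·)) :
    PySem.List.bisectLeft s x = s.countP (fun v => decide (v < x)) := by
  obtain ⟨hle, hlt, hge⟩ := PySem.List.bisectLeft_spec s x hs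
  refine (pv_countP_of_prefix _ s (PySem.List.bisectLeft s x) hle ?_).symm
  intro j hj
  by_cases hc : j < PySem.List.bisectLeft s x
  · simp [hlt j hj hc, hc]
  · have := hge j hj (Nat.le_of_not_lt hc)
    simp [hc]; omega

-- counting below two thresholds differs by the count of the band between them
theorem pv_count_band (vs : List Int) (a b : Int) (hab : a ≤ b) :
    vs.countP (fun v => decide (v < b)) =
      vs.countP (fun v => decide (v < a)) +
        vs.countP (fun v => decide (a ≤ v) && decide (v < b)) := by
  induction vs with
  | nil => simp
  | cons v vs ih =>
    simp only [List.countP_cons, Bool.and_eq_true, decide_eq_true_eq]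
    split_ifs <;> omega

-- building a list by appending each visited element reproduces the list
theorem pv_foldl_append_id (l : List Int) : ∀ acc : List Int,
    l.foldl (fun a v => a ++ [v]) acc = acc ++ l := by
  induction l with
  | nil => simp
  | cons v t ih => intro acc; simp [ih]

-- B's per-image verdict equals pvIsBad
theorem pvB_cond_eq_isBad (p : Nat) (img : List (List Int))
    (hlen : p ≤ img.length) (hrow : ∀ row ∈ img.take p, p ≤ row.length) :
    (let window := PySem.List.sorted
        ((PySem.List.pyRange 0 (p : Int) 1).foldl (fun acc i =>
            (PySem.List.pyRange 0 (p : Int) 1).foldl (fun acc j =>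
              acc ++ [PySem.List.pyGetD (PySem.List.pyGetD img i []) j 0]) acc) [])
        (fun v => v) false
     let lo225 : Int := (PySem.List.bisectLeft window 225 : Nat)
     let gray : Int := lo225 - ((PySem.List.bisectLeft window 30 : Nat) : Int)
     let bright : Int := ((PySem.List.bisectLeft window 256 : Nat) : Int) - lo225
     (gray > 500 ∨ bright < 10)) ↔ pvIsBad p img = true := by
  have hsl : (PySem.List.pyRange 0 (p : Int) 1).foldl (fun acc i =>
        (PySem.List.pyRange 0 (p : Int) 1).foldl (fun acc j =>
          acc ++ [PySem.List.pyGetD (PySem.List.pyGetD img i []) j 0]) acc) ([] : List Int)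
      = pvWindow p img := by
    rw [pv_inner_window_img (fun (a : List Int) (v : Int) => a ++ [v]) img p [] hlen hrow]
    exact pv_foldl_append_id (pvWindow p img) []
  simp only [hsl]
  set w := pvWindow p img with hw
  set s := PySem.List.sorted w (fun v => v) false with hsdef
  have hperm : s.Perm w := PySem.List.sorted_perm w (fun v => v) false
  have hpw : s.Pairwise (· ≤ ·) := by
    have := PySem.List.sorted_pairwise w (fun v => v)
    simpa using this
  have hb : ∀ x : Int, PySem.List.bisectLeft s x = w.countP (fun v => decide (v < x)) := by
    intro x
    rw [pv_bisectLeft_eq_countP s x hpw, hperm.countP_eq]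
  have h30 := pv_count_band w 30 225 (by omega)
  have h225 := pv_count_band w 225 256 (by omega)
  have hband : w.countP (fun v => decide (225 ≤ v) && decide (v < 256)) =
      w.countP (fun v => decide (225 ≤ v) && decide (v ≤ 255)) := by
    apply List.countP_congr
    intro v _
    simp only [Bool.and_eq_true, decide_eq_true_eq]
    constructor <;> intro h <;> simp_all <;> omega
  simp only [pvIsBad, Bool.or_eq_true, decide_eq_true_eq, hb, ← hw]
  rw [hband] at h225
  omega

-- the common result, written structurally
def pvBadFrom (p : Nat) (s : Int) : List (List (List Int)) → List Int
  | [] => []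
  | img :: rest => (if pvIsBad p img then [s] else []) ++ pvBadFrom p (s + 1) rest

theorem pvA_loop (t : List (List (List Int))) (p : Nat)
    (hp : ∀ img ∈ t, p ≤ img.length ∧ ∀ row ∈ img.take p, p ≤ row.length) :
    ∀ (n : Nat), ∀ (s : Int) (bad : List Int), 0 ≤ s → s + n = t.length →
      ((PySem.List.pyRange s (s + n) 1).foldl (pvA_step t p) (bad, [0, 0, 0, 0, 0, 0])).1 =
        bad ++ pvBadFrom p s (t.drop s.toNat) := by
  intro n
  induction n with
  | zero =>
    intro s bad h0 hlen
    rw [show s + (0:Nat) = s by omega, PySem.List.pyRange_one_eq_nil (le_refl s)]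
    rw [List.drop_of_length_le (by omega)]
    simp [pvBadFrom]
  | succ n ih =>
    intro s bad h0 hlen
    have hs : s.toNat < t.length := by omega
    have himg : PySem.List.pyGetD t s [] = t[s.toNat] :=
      PySem.List.pyGetD_eq_getElem t [] h0 (by omega)
    obtain ⟨hl, hr⟩ := hp t[s.toNat] (List.getElem_mem hs)
    rw [PySem.List.pyRange_one_cons (by omega), List.foldl_cons]
    have hstep : pvA_step t p (bad, [0, 0, 0, 0, 0, 0]) s =
        (bad ++ (if pvIsBad p t[s.toNat] then [s] else []), [0, 0, 0, 0, 0, 0]) := by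
      have hc := pvA_cond_eq_isBad t p s t[s.toNat] himg hl hr
      simp only at hc
      simp only [pvA_step]
      rw [if_congr hc rfl rfl]
      split_ifs <;> simp
    rw [hstep]
    have harr : s + ((n : Int) + 1) = (s + 1) + n := by ring
    rw [show ((n + 1 : Nat) : Int) = (n : Int) + 1 by push_cast; ring, harr]
    rw [ih (s + 1) _ (by omega) (by omega)]
    rw [List.drop_eq_getElem_cons hs]
    have : (s + 1).toNat = s.toNat + 1 := by omega
    rw [this]
    simp [pvBadFrom]

-- B's enumerate fold equals pvBadFrom
theorem pvB_loop (p : Nat) :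
    ∀ (t : List (List (List Int))),
      (∀ img ∈ t, p ≤ img.length ∧ ∀ row ∈ img.take p, p ≤ row.length) →
      ∀ (s : Int) (bad : List Int),
      (PySem.List.enumerate t s).foldl
        (fun badImgs xi =>
          let window := PySem.List.sorted
            ((PySem.List.pyRange 0 (p : Int) 1).foldl (fun acc i =>
                (PySem.List.pyRange 0 (p : Int) 1).foldl (fun acc j =>
                  acc ++ [PySem.List.pyGetD (PySem.List.pyGetD xi.2 i []) j 0]) acc) [])
            (fun v => v) false
          let lo225 : Int := (PySem.List.bisectLeft window 225 : Nat)
          let gray : Int := lo225 - ((PySem.List.bisectLeft window 30 : Nat) : Int)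
          let bright : Int := ((PySem.List.bisectLeft window 256 : Nat) : Int) - lo225
          if gray > 500 ∨ bright < 10 then badImgs ++ [xi.1] else badImgs) bad =
      bad ++ pvBadFrom p s t := by
  intro t
  induction t with
  | nil => intro _ s bad; simp [PySem.List.enumerate_nil, pvBadFrom]
  | cons img rest ih =>
    intro hp s bad
    obtain ⟨hl, hr⟩ := hp img (List.mem_cons_self ..)
    rw [PySem.List.enumerate_cons, List.foldl_cons]
    have hc := pvB_cond_eq_isBad p img hl hr
    simp only at hc
    simp only [if_congr hc rfl rfl]
    rw [ih (fun i hi => hp i (List.mem_cons_of_mem _ hi))]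
    by_cases hb : pvIsBad p img <;> simp [pvBadFrom, hb]

-- ===== VERDICT (by name: the statement is the Claim_ definition above) =====
theorem imageQuality_check_spec : Claim_equal_imageQuality_check := by
  intro t _ hpre
  unfold Spec_imageQuality_check
  obtain ⟨hl1, hl2, h3⟩ := hpre
  simp only [imageQuality_check, imageQuality_check_alt]
  have hp' : (PySem.List.pyGetD (PySem.List.pyGetD t 1 []) 1 []).length =
      ((t.getD 1 []).getD 1 []).length := by
    simp [PySem.List.pyGetD_ofNat']
  rw [hp']
  have hA := pvA_loop t ((t.getD 1 []).getD 1 []).length h3 t.length 0 [] (le_refl 0) (by omega)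
  have hB := pvB_loop ((t.getD 1 []).getD 1 []).length t h3 0 []
  rw [zero_add] at hA
  simp only [Int.toNat_zero, List.drop_zero] at hA
  rw [hA, hB]
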